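-- pv_equiv track=rewrite | github.com/Stigggggg/UWr | SI/Pracownia 1/zad5.py | opt_dist
-- ===== SOURCE A (Python) =====
-- def opt_dist(list, d): # z zadania 4
--     n = len(list)
--     res = float('inf')
--     for i in range(n - d + 1):
--         changes = 0
--         for j in range(i, i + d):
--             if list[j] == 0:
--                 changes += 1
--         for j in range(0, i):
--             if list[j] == 1:
--                 changes += 1
--         for j in range(i + d, n):
--             if list[j] == 1:
--                 changes += 1
--         res = min(res, changes)
--     return res
-- ===== SOURCE B (Python) =====
-- def opt_dist(list, d):
--     # One pass of prefix sums: changes(i) = ones_total + (zeros-ones weight of window i),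
--     # so the answer is ones_total + min over windows of pref[i+d]-pref[i].  O(n) vs A's O(n*d).
--     pref = [0]
--     acc = 0
--     ones = 0
--     for x in list:
--         if x == 0:
--             acc += 1
--         elif x == 1:
--             acc -= 1
--             ones += 1
--         pref.append(acc)
--     n = len(list)
--     return ones + min(pref[i + d] - pref[i] for i in range(n - d + 1))
-- ===== Notes on version B (the rewrite author's own statement) =====
-- stated objective: faster
-- what changed: B replaces A's per-window rescan of the whole list (three inner loops per start index) by one prefix-sum pass over the list (weight zeros-minus-ones) and then takes ones_total plus the minimum window prefix difference in O(1) per window.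
-- outside the precondition, e.g. on opt_dist([1, 0, 1], 5): A returns inf, B raises ValueError
import Mathlib
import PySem

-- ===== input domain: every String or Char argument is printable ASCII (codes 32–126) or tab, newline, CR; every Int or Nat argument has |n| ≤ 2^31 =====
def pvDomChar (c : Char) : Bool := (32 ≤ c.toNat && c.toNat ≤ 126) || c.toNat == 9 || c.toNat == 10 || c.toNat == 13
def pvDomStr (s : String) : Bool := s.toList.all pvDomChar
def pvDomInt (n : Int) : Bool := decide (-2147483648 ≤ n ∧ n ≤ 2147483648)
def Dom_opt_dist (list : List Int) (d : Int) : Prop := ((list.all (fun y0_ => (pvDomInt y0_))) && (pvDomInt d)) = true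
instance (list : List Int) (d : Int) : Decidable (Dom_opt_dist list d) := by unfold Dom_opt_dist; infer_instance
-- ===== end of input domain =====

-- B computes the same optimum in one prefix-sum pass instead of A's three rescanning loops per window (equal return values proved under Pre_: 0 ≤ d ≤ len(list)).


-- ===== PORT A =====
-- literal port of A; res : Option Int with none = the initial float('inf') (under Pre_ the loop runs
-- at least once, so the final res is never none); list[j] is ported as (pyGet? …).getD 0 — under Pre_
-- every index A reads is in range, so the default is unreachable
def opt_dist (list : List Int) (d : Int) : Int :=
  let n : Int := list.length
  let res : Option Int :=
    (PySem.List.pyRange 0 (n - d + 1)).foldl (fun res i =>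
      let c1 := (PySem.List.pyRange i (i + d)).foldl
        (fun c j => if ((PySem.List.pyGet? list j).getD 0) == 0 then c + 1 else c) (0 : Int)
      let c2 := (PySem.List.pyRange 0 i).foldl
        (fun c j => if ((PySem.List.pyGet? list j).getD 0) == 1 then c + 1 else c) c1
      let changes := (PySem.List.pyRange (i + d) n).foldl
        (fun c j => if ((PySem.List.pyGet? list j).getD 0) == 1 then c + 1 else c) c2
      some (match res with | none => changes | some r => min r changes)) none
  res.getD 0

-- ===== PORT B =====
-- port of Source B: one left fold building (pref, acc, ones), then the minimum of the window
-- prefix differences; the [] branch of the match is Python's ValueError from min() on an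
-- empty generator (excluded by Pre_)
def opt_dist_alt (list : List Int) (d : Int) : Int :=
  let s := list.foldl (fun (s : List Int × Int × Int) x =>
      let acc := if x == 0 then s.2.1 + 1 else if x == 1 then s.2.1 - 1 else s.2.1
      let ones := if x == 1 then s.2.2 + 1 else s.2.2
      (s.1 ++ [acc], acc, ones)) ([(0 : Int)], (0 : Int), (0 : Int))
  let pref := s.1
  let n : Int := list.length
  let vals := (PySem.List.pyRange 0 (n - d + 1)).map
      (fun i => (PySem.List.pyGet? pref (i + d)).getD 0 - (PySem.List.pyGet? pref i).getD 0)
  match vals with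
  | [] => 0
  | v :: vs => s.2.2 + vs.foldl min v

-- ===== PRECONDITION & SPEC =====
-- Pre_ restricts to the task's natural domain 0 ≤ d ≤ len(list); outside it A never returns an int:
-- for every d < 0 A raises IndexError (its 'ones before i' loop reaches index n on the last window),
-- and for d > len(list) it returns float('inf'), which is not a value of the declared int type.
def Pre_opt_dist (list : List Int) (d : Int) : Prop := 0 ≤ d ∧ d ≤ list.length
instance (list : List Int) (d : Int) : Decidable (Pre_opt_dist list d) := by
  unfold Pre_opt_dist; infer_instance
def pvWitness_opt_dist : List Int × Int := ([1, 0, 1, 1], 2)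

def Spec_opt_dist (list : List Int) (d : Int) (out : Int) : Prop := out = opt_dist_alt list d
instance (list : List Int) (d : Int) (out : Int) : Decidable (Spec_opt_dist list d out) := by
  unfold Spec_opt_dist; infer_instance

-- ===== CLAIM (what is proved, stated in full; the proofs are below) =====
def Claim_equal_opt_dist : Prop := ∀ (list : List Int) (d : Int),
  Dom_opt_dist list d → Pre_opt_dist list d → Spec_opt_dist list d (opt_dist list d)

-- ===== LEMMAS AND PROOFS =====

-- weight (zeros minus ones) and number of ones of a list
def pvW (l : List Int) : Int :=
  (l.countP (fun x => x == 0) : Int) - (l.countP (fun x => x == 1) : Int)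
def pvO (l : List Int) : Int := (l.countP (fun x => x == 1) : Int)

-- a counting loop over range(a, b) equals countP over the corresponding segment of l
lemma pv_count_loop (l : List Int) (p : Int → Bool) (a b : Nat) (hb : b ≤ l.length)
    (c0 : Int) :
    (PySem.List.pyRange (a : Int) (b : Int)).foldl
      (fun c j => if p ((PySem.List.pyGet? l j).getD 0) then c + 1 else c) c0
    = c0 + (((l.drop a).take (b - a)).countP p : Int) := by
  induction hm : b - a generalizing a c0 with
  | zero =>
    have : ((b : Int) - (a : Int)).toNat = 0 := by omega
    simp [PySem.List.pyRange_one, this]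
  | succ m ih =>
    have hab : (a : Int) < (b : Int) := by omega
    have ha : a < l.length := by omega
    rw [PySem.List.pyRange_one_cons hab, List.foldl_cons, PySem.List.pyGet?_natCast]
    have h1 : (a : Int) + 1 = ((a + 1 : Nat) : Int) := by push_cast; ring
    rw [h1, ih (a + 1) _ (by omega)]
    have hdrop : l.drop a = l[a] :: l.drop (a + 1) := (List.getElem_cons_drop ha).symm
    rw [hdrop, List.take_succ_cons, List.countP_cons]
    simp only [List.getElem?_eq_getElem ha, Option.getD_some]
    by_cases hp : p l[a]
    · simp [hp]; omega
    · simp [hp]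

-- B's fold builds exactly the prefix weights, the total weight, and the number of ones
lemma pv_fold_char (l : List Int) :
    l.foldl (fun (s : List Int × Int × Int) x =>
      let acc := if x == 0 then s.2.1 + 1 else if x == 1 then s.2.1 - 1 else s.2.1
      let ones := if x == 1 then s.2.2 + 1 else s.2.2
      (s.1 ++ [acc], acc, ones)) ([(0 : Int)], (0 : Int), (0 : Int))
    = ((List.range (l.length + 1)).map (fun k => pvW (l.take k)), pvW l, pvO l) := by
  induction l using List.reverseRecOn with
  | nil => simp [pvW, pvO]
  | append_singleton l x ih =>
    rw [List.foldl_append, ih]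
    simp only [List.foldl_cons, List.foldl_nil]
    have hW : pvW (l ++ [x]) =
        (if x == 0 then pvW l + 1 else if x == 1 then pvW l - 1 else pvW l) := by
      simp only [pvW, List.countP_append, List.countP_cons, List.countP_nil]
      by_cases h0 : x = 0
      · simp [h0]; omega
      · by_cases h1 : x = 1
        · simp [h1]; omega
        · simp [h0, h1]
    have hO : pvO (l ++ [x]) = (if x == 1 then pvO l + 1 else pvO l) := by
      simp only [pvO, List.countP_append, List.countP_cons, List.countP_nil]
      by_cases h1 : x = 1
      · simp [h1]
      · simp [h1]
    refine Prod.ext ?_ (Prod.ext ?_ ?_) <;> simp only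
    · rw [← hW]
      conv_rhs => rw [show (l ++ [x]).length + 1 = (l.length + 1) + 1 by simp,
        List.range_succ, List.map_append]
      congr 1
      · apply List.map_congr_left
        intro k hk
        rw [List.take_append_of_le_length (Nat.lt_succ_iff.mp (List.mem_range.mp hk))]
      · simp [List.take_of_length_le (by simp : (l ++ [x]).length ≤ l.length + 1)]
    · rw [← hW]
    · rw [← hO]

-- A's `changes` at window start i equals ones_total + (prefix-weight difference of the window)
lemma pv_changes_eq (l : List Int) (i k : Nat) (hik : i + k ≤ l.length) :
    ((PySem.List.pyRange ((i : Int) + (k : Int)) (l.length : Int)).foldl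
      (fun c j => if ((PySem.List.pyGet? l j).getD 0) == 1 then c + 1 else c)
      ((PySem.List.pyRange 0 (i : Int)).foldl
        (fun c j => if ((PySem.List.pyGet? l j).getD 0) == 1 then c + 1 else c)
        ((PySem.List.pyRange (i : Int) ((i : Int) + (k : Int))).foldl
          (fun c j => if ((PySem.List.pyGet? l j).getD 0) == 0 then c + 1 else c) 0)))
    = pvO l + (pvW (l.take (i + k)) - pvW (l.take i)) := by
  have hc : (i : Int) + (k : Int) = ((i + k : Nat) : Int) := by push_cast; ring
  have l2 : ∀ c0 : Int, (PySem.List.pyRange 0 (i : Int)).foldl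
      (fun c j => if ((PySem.List.pyGet? l j).getD 0) == 1 then c + 1 else c) c0
      = c0 + (((l.drop 0).take (i - 0)).countP (fun x => x == 1) : Int) := by
    intro c0
    simpa using pv_count_loop l (fun x => x == 1) 0 i (by omega) c0
  rw [hc, pv_count_loop l (fun x => x == 0) i (i + k) hik 0, l2,
      pv_count_loop l (fun x => x == 1) (i + k) l.length (le_refl _) _]
  have hwin : (l.drop i).take (i + k - i) = (l.drop i).take k := by congr 1; omega
  have hrest : (l.drop (i + k)).take (l.length - (i + k)) = l.drop (i + k) := by
    apply List.take_of_length_le; simp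
  rw [hwin, hrest]
  simp only [List.drop_zero, Nat.sub_zero]
  have htk : l.take (i + k) = l.take i ++ (l.drop i).take k := List.take_add
  have hsplit : l.countP (fun x => x == 1) =
      (l.take (i + k)).countP (fun x => x == 1) + (l.drop (i + k)).countP (fun x => x == 1) := by
    conv_lhs => rw [← List.take_append_drop (i + k) l]
    rw [List.countP_append]
  simp only [pvW, pvO, htk, List.countP_append, hsplit]
  push_cast
  ring

-- min-fold with an Option accumulator (A's res), continued from some r
lemma pv_opt_fold_aux (f : Int → Int) (rest : List Int) (r : Int) :
    rest.foldl (fun res i =>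
      some (match res with | none => f i | some r => min r (f i))) (some r)
    = some (rest.foldl (fun r i => min r (f i)) r) := by
  induction rest generalizing r with
  | nil => rfl
  | cons x t ih => simp [List.foldl_cons, ih]

-- min-fold with an Option accumulator (A) vs plain min-fold from the head (B)
lemma pv_opt_fold (f : Int → Int) (a : Int) (rest : List Int) :
    (a :: rest).foldl (fun res i =>
      some (match res with | none => f i | some r => min r (f i))) none
    = some (rest.foldl (fun r i => min r (f i)) (f a)) := by
  simp [List.foldl_cons, pv_opt_fold_aux]

-- pulling a pointwise additive constant out of a min-fold
lemma pv_min_fold_add (c : Int) (f g : Int → Int) (rest : List Int) (b : Int)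
    (h : ∀ i ∈ rest, f i = c + g i) :
    rest.foldl (fun r i => min r (f i)) (c + b)
    = c + rest.foldl (fun r i => min r (g i)) b := by
  induction rest generalizing b with
  | nil => rfl
  | cons x t ih =>
    simp only [List.foldl_cons]
    rw [h x (by simp), min_add_add_left, ih _ (fun i hi => h i (by simp [hi]))]

lemma pv_main (l : List Int) (d : Int) (hd0 : 0 ≤ d) (hdn : d ≤ l.length) :
    opt_dist l d = opt_dist_alt l d := by
  obtain ⟨k, rfl⟩ : ∃ k : Nat, d = (k : Int) := ⟨d.toNat, (Int.toNat_of_nonneg hd0).symm⟩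
  have hkn : k ≤ l.length := by exact_mod_cast hdn
  simp only [opt_dist, opt_dist_alt, pv_fold_char]
  have hrng : (l.length : Int) - (k : Int) + 1 = ((l.length - k + 1 : Nat) : Int) := by omega
  rw [hrng, PySem.List.pyRange_zero_natCast]
  -- F = A's per-window change count, G = B's per-window prefix difference
  set F : Int → Int := fun i =>
    (PySem.List.pyRange (i + (k : Int)) (l.length : Int)).foldl
      (fun c j => if ((PySem.List.pyGet? l j).getD 0) == 1 then c + 1 else c)
      ((PySem.List.pyRange 0 i).foldl
        (fun c j => if ((PySem.List.pyGet? l j).getD 0) == 1 then c + 1 else c)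
        ((PySem.List.pyRange i (i + (k : Int))).foldl
          (fun c j => if ((PySem.List.pyGet? l j).getD 0) == 0 then c + 1 else c) 0)) with hF
  set G : Int → Int := fun i =>
    (PySem.List.pyGet? ((List.range (l.length + 1)).map (fun j => pvW (l.take j))) (i + (k : Int))).getD 0 -
      (PySem.List.pyGet? ((List.range (l.length + 1)).map (fun j => pvW (l.take j))) i).getD 0 with hG
  have key : ∀ i ∈ (List.range (l.length - k + 1)).map (fun m : Nat => (m : Int)),
      F i = pvO l + G i := by
    intro i hi
    obtain ⟨m, hm, rfl⟩ := List.mem_map.mp hi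
    have hmk : m + k ≤ l.length := by
      have := List.mem_range.mp hm; omega
    rw [hF, hG]
    simp only
    rw [pv_changes_eq l m k hmk]
    have hc : (m : Int) + (k : Int) = ((m + k : Nat) : Int) := by push_cast; ring
    rw [hc, PySem.List.pyGet?_natCast, PySem.List.pyGet?_natCast]
    rw [List.getElem?_map, List.getElem?_map,
        List.getElem?_range (by omega : m + k < l.length + 1),
        List.getElem?_range (by omega : m < l.length + 1)]
    simp
  cases his : (List.range (l.length - k + 1)).map (fun m : Nat => (m : Int)) with
  | nil =>
    exfalso
    have := congrArg List.length his
    simp at this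
  | cons a rest =>
    rw [his] at key
    rw [pv_opt_fold F a rest, Option.getD_some, List.map_cons]
    simp only
    rw [List.foldl_map]
    rw [key a (by simp), pv_min_fold_add (pvO l) F G rest (G a)
        (fun i hi => key i (by simp [hi]))]

-- ===== VERDICT (by name: the statement is the Claim_ definition above) =====
theorem opt_dist_spec : Claim_equal_opt_dist := by
  intro list d _ hPre
  unfold Spec_opt_dist
  exact pv_main list d hPre.1 hPre.2
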